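-- pv_equiv track=rewrite | github.com/Merlendo/Scabble-101 | placement.py | comptage
-- ===== SOURCE A (Python) =====
-- def comptage(board,mot,direction,i,j):
--     vide=["x","MT","MD","LT","LD"]
--     bonus_lettres=["LT","LD"]
--     bonus_mot=["MT","MD"]
--     valeurs_bonus_mot=[0,0]
--     valeurs_bonus_lettres=[]
--
--     if direction == "horizontale":
--         colonne=j
--
--         for elem in mot:
--
--             if board[i][colonne] in bonus_lettres:
--
--                 if board[i][colonne] == "LT":
--                     valeurs_bonus_lettres.append(3)
--                 else:
--                     valeurs_bonus_lettres.append(2)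
--
--             elif board[i][colonne] in bonus_mot:
--                 valeurs_bonus_lettres.append(1)
--
--                 if board[i][colonne]=="MT":
--                     valeurs_bonus_mot[0]=3
--                 else:
--                     valeurs_bonus_mot[1]=2
--
--             else:
--                 valeurs_bonus_lettres.append(1)
--
--             colonne=colonne+1
--
--     if direction == "verticale":
--         ligne=i
--
--         for elem in mot:
--
--             if board[ligne][j] in bonus_lettres:
--
--                 if board[ligne][j] == "LT":
--                     valeurs_bonus_lettres.append(3)
--                 else:
--                     valeurs_bonus_lettres.append(2)
--
--             elif board[ligne][j] in bonus_mot: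
--                 valeurs_bonus_lettres.append(1)
--
--                 if board[ligne][j]=="MT":
--                     valeurs_bonus_mot[0]=3
--                 else:
--                     valeurs_bonus_mot[1]=2
--
--             else:
--                 valeurs_bonus_lettres.append(1)
--
--             ligne=ligne+1
--
--     values=[valeurs_bonus_mot,valeurs_bonus_lettres]
--
--     return values
-- ===== SOURCE B (Python) =====
-- def comptage(board, mot, direction, i, j):
--     if direction == "horizontale":
--         dr, dc = 0, 1
--     elif direction == "verticale":
--         dr, dc = 1, 0
--     else:
--         return [[0, 0], []]
--
--     def go(k):
--         # bonuses for positions k .. len(mot)-1, computed back-to-front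
--         if k == len(mot):
--             return 0, 0, []
--         cell = board[i + dr * k][j + dc * k]
--         m0, m1, lettres = go(k + 1)
--         if cell == "LT":
--             return m0, m1, [3] + lettres
--         if cell == "LD":
--             return m0, m1, [2] + lettres
--         if cell == "MT":
--             return 3, m1, [1] + lettres
--         if cell == "MD":
--             return m0, 2, [1] + lettres
--         return m0, m1, [1] + lettres
--
--     m0, m1, lettres = go(0)
--     return [[m0, m1], lettres]
-- ===== Notes on version B (the rewrite author's own statement) =====
-- stated objective: alternative
-- what changed: Replaces A's two imperative direction loops with mutable list state by a single backward structural recursion over word positions (one direction offset), which builds the letter-multiplier list by consing on return and threads the two word multipliers functionally instead of in-place index assignment.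
import Mathlib
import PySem

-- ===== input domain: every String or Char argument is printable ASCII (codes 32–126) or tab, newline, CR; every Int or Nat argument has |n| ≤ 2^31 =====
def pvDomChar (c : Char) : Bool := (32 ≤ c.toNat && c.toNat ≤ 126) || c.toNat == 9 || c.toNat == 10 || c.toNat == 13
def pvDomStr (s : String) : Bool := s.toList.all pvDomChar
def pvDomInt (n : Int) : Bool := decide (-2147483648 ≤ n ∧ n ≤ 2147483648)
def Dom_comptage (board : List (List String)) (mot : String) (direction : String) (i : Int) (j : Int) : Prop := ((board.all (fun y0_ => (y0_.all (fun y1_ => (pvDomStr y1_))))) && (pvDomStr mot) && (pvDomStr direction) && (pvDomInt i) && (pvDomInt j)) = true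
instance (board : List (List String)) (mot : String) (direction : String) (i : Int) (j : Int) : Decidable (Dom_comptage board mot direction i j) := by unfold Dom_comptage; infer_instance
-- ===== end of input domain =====

-- B replaces A's two imperative direction loops (mutable bonus lists, append) by one backward
-- structural recursion over word positions, consing the letter list and threading the word
-- multipliers functionally (alternative decomposition, same cost).

-- board[r][c] with Python indexing; Pre_ guarantees both indexes are in range, so the defaults are never used
def pvCellD (board : List (List String)) (r c : Int) : String :=
  PySem.List.pyGetD (PySem.List.pyGetD board r []) c ""

-- ===== PORT A =====
-- the body of either of A's loops: state (counter, valeurs_bonus_mot, valeurs_bonus_lettres); g = cell at the counter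
def pvStep (g : Int → String) (st : Int × List Int × List Int) (_ : Char) : Int × List Int × List Int :=
  let cell := g st.1
  if cell = "LT" ∨ cell = "LD" then
    (st.1 + 1, st.2.1, st.2.2 ++ [if cell = "LT" then (3 : Int) else 2])
  else if cell = "MT" ∨ cell = "MD" then
    (st.1 + 1, (if cell = "MT" then st.2.1.set 0 3 else st.2.1.set 1 2), st.2.2 ++ [1])
  else
    (st.1 + 1, st.2.1, st.2.2 ++ [(1 : Int)])

def comptage (board : List (List String)) (mot : String) (direction : String) (i : Int) (j : Int) : List (List Int) :=
  let vm0 : List Int := [0, 0]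
  let vl0 : List Int := []
  let s1 :=
    if direction = "horizontale" then
      let r := mot.toList.foldl (pvStep (fun colonne => pvCellD board i colonne)) (j, vm0, vl0)
      (r.2.1, r.2.2)
    else (vm0, vl0)
  let s2 :=
    if direction = "verticale" then
      let r := mot.toList.foldl (pvStep (fun ligne => pvCellD board ligne j)) (i, s1.1, s1.2)
      (r.2.1, r.2.2)
    else s1
  [s2.1, s2.2]

-- ===== PORT B =====
-- Source B's inner 'go(k)': backward recursion on the remaining length n = len(mot) - k
def pvGo (f : Nat → String) : Nat → Nat → Int × Int × List Int
  | _, 0 => (0, 0, [])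
  | k, n + 1 =>
    let cell := f k
    let r := pvGo f (k + 1) n
    if cell = "LT" then (r.1, r.2.1, 3 :: r.2.2)
    else if cell = "LD" then (r.1, r.2.1, 2 :: r.2.2)
    else if cell = "MT" then (3, r.2.1, 1 :: r.2.2)
    else if cell = "MD" then (r.1, 2, 1 :: r.2.2)
    else (r.1, r.2.1, 1 :: r.2.2)

def pvRun (board : List (List String)) (mot : String) (i j dr dc : Int) : List (List Int) :=
  let r := pvGo (fun k => pvCellD board (i + dr * (k : Int)) (j + dc * (k : Int))) 0 mot.toList.length
  [[r.1, r.2.1], r.2.2]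

def comptage_alt (board : List (List String)) (mot : String) (direction : String) (i : Int) (j : Int) : List (List Int) :=
  if direction = "horizontale" then pvRun board mot i j 0 1
  else if direction = "verticale" then pvRun board mot i j 1 0
  else [[0, 0], []]

-- ===== PRECONDITION & SPEC =====
-- board[r][c], none exactly where Python raises IndexError
def pvCell? (board : List (List String)) (r c : Int) : Option String :=
  (PySem.List.pyGet? board r).bind (fun row => PySem.List.pyGet? row c)

-- Pre_ excludes exactly the inputs on which A raises IndexError: some traversed cell is out of the board
def Pre_comptage (board : List (List String)) (mot : String) (direction : String) (i : Int) (j : Int) : Prop :=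
  (direction = "horizontale" →
    ∀ k ∈ List.range mot.toList.length, (pvCell? board i (j + (k : Int))).isSome = true) ∧
  (direction = "verticale" →
    ∀ k ∈ List.range mot.toList.length, (pvCell? board (i + (k : Int)) j).isSome = true)
instance (board : List (List String)) (mot : String) (direction : String) (i : Int) (j : Int) : Decidable (Pre_comptage board mot direction i j) := by unfold Pre_comptage; infer_instance

def pvWitness_comptage : List (List String) × String × String × Int × Int :=
  ([["x", "LT"], ["MD", "x"]], "ab", "horizontale", 0, 0)

def Spec_comptage (board : List (List String)) (mot : String) (direction : String) (i : Int) (j : Int) (out : List (List Int)) : Prop := out = comptage_alt board mot direction i j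
instance (board : List (List String)) (mot : String) (direction : String) (i : Int) (j : Int) (out : List (List Int)) : Decidable (Spec_comptage board mot direction i j out) := by unfold Spec_comptage; infer_instance

-- ===== CLAIM (what is proved, stated in full; the proofs are below) =====
def Claim_equal_comptage : Prop := ∀ (board : List (List String)) (mot : String) (direction : String) (i : Int) (j : Int), Dom_comptage board mot direction i j → Pre_comptage board mot direction i j → Spec_comptage board mot direction i j (comptage board mot direction i j)

-- ===== LEMMAS AND PROOFS =====

-- the cells A's loop visits (Int counter), as a structural recursion
def pvCells (g : Int → String) : Int → Nat → List String
  | _, 0 => []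
  | t, n + 1 => g t :: pvCells g (t + 1) n

-- the cells B's recursion visits (Nat position)
def pvCellsN (f : Nat → String) : Nat → Nat → List String
  | _, 0 => []
  | k, n + 1 => f k :: pvCellsN f (k + 1) n

def pvScore (c : String) : Int := if c = "LT" then 3 else if c = "LD" then 2 else 1

theorem pvCells_eq_map (g : Int → String) : ∀ (n : Nat) (t : Int),
    pvCells g t n = (List.range n).map (fun (k : Nat) => g (t + (k : Int))) := by
  intro n
  induction n with
  | zero => intro t; simp [pvCells]
  | succ n ih =>
    intro t
    rw [List.range_succ_eq_map, List.map_cons, List.map_map]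
    simp only [pvCells, ih]
    congr 1
    · norm_num
    · apply List.map_congr_left
      intro k _
      simp only [Function.comp]
      congr 1
      push_cast
      ring

theorem pvCellsN_eq_map (f : Nat → String) : ∀ (n k : Nat),
    pvCellsN f k n = (List.range n).map (fun m => f (k + m)) := by
  intro n
  induction n with
  | zero => intro k; simp [pvCellsN]
  | succ n ih =>
    intro k
    rw [List.range_succ_eq_map, List.map_cons, List.map_map]
    simp only [pvCellsN, ih]
    congr 1
    apply List.map_congr_left
    intro m _
    simp only [Function.comp]
    congr 1
    omega

-- characterisation of A's loop
theorem pvLoop (g : Int → String) : ∀ (l : List Char) (t m0 m1 : Int) (vl : List Int),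
    List.foldl (pvStep g) (t, [m0, m1], vl) l =
      (t + l.length,
       [if "MT" ∈ pvCells g t l.length then 3 else m0,
        if "MD" ∈ pvCells g t l.length then 2 else m1],
       vl ++ (pvCells g t l.length).map pvScore) := by
  intro l
  induction l with
  | nil => intro t m0 m1 vl; simp [pvCells]
  | cons c l ih =>
    intro t m0 m1 vl
    simp only [List.foldl_cons, List.length_cons, pvCells]
    by_cases h1 : g t = "LT"
    · have hstep : pvStep g (t, [m0, m1], vl) c = (t + 1, [m0, m1], vl ++ [3]) := by
        simp [pvStep, h1]
      rw [hstep, ih, Prod.mk.injEq, Prod.mk.injEq]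
      refine ⟨by push_cast; ring, ?_, ?_⟩
      · simp [List.mem_cons, h1]
      · simp [pvScore, h1]
    · by_cases h2 : g t = "LD"
      · have hstep : pvStep g (t, [m0, m1], vl) c = (t + 1, [m0, m1], vl ++ [2]) := by
          simp [pvStep, h2]
        rw [hstep, ih, Prod.mk.injEq, Prod.mk.injEq]
        refine ⟨by push_cast; ring, ?_, ?_⟩
        · simp [List.mem_cons, h2]
        · simp [pvScore, h2]
      · by_cases h3 : g t = "MT"
        · have hstep : pvStep g (t, [m0, m1], vl) c = (t + 1, [3, m1], vl ++ [1]) := by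
            simp [pvStep, h3, List.set]
          rw [hstep, ih, Prod.mk.injEq, Prod.mk.injEq]
          refine ⟨by push_cast; ring, ?_, ?_⟩
          · simp [List.mem_cons, h3]
          · simp [pvScore, h3]
        · by_cases h4 : g t = "MD"
          · have hstep : pvStep g (t, [m0, m1], vl) c = (t + 1, [m0, 2], vl ++ [1]) := by
              simp [pvStep, h4, List.set]
            rw [hstep, ih, Prod.mk.injEq, Prod.mk.injEq]
            refine ⟨by push_cast; ring, ?_, ?_⟩
            · simp [h4]
            · simp [pvScore, h4]
          · have hstep : pvStep g (t, [m0, m1], vl) c = (t + 1, [m0, m1], vl ++ [1]) := by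
              simp [pvStep, h1, h2, h3, h4]
            rw [hstep, ih, Prod.mk.injEq, Prod.mk.injEq]
            refine ⟨by push_cast; ring, ?_, ?_⟩
            · simp [List.mem_cons, Ne.symm h3, Ne.symm h4]
            · simp [pvScore, h1, h2]

-- characterisation of B's recursion
theorem pvGo_eq (f : Nat → String) : ∀ (n k : Nat),
    pvGo f k n =
      (if "MT" ∈ pvCellsN f k n then 3 else 0,
       if "MD" ∈ pvCellsN f k n then 2 else 0,
       (pvCellsN f k n).map pvScore) := by
  intro n
  induction n with
  | zero => intro k; simp [pvGo, pvCellsN]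
  | succ n ih =>
    intro k
    simp only [pvGo, pvCellsN, ih]
    by_cases h1 : f k = "LT"
    · simp [h1, pvScore]
    · by_cases h2 : f k = "LD"
      · simp [h2, pvScore]
      · by_cases h3 : f k = "MT"
        · simp [h3, pvScore]
        · by_cases h4 : f k = "MD"
          · simp [h4, pvScore]
          · simp [h1, h2, h3, h4, Ne.symm h3, Ne.symm h4, pvScore]

-- ===== VERDICT (by name: the statement is the Claim_ definition above) =====
theorem comptage_spec : Claim_equal_comptage := by
  intro board mot direction i j _ _
  unfold Spec_comptage
  by_cases hd1 : direction = "horizontale"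
  · subst hd1
    have hA := pvLoop (fun colonne => pvCellD board i colonne) mot.toList j 0 0 []
    have hB := pvGo_eq (fun k : Nat => pvCellD board i (j + (k : Int))) mot.toList.length 0
    have hc : pvCells (fun colonne => pvCellD board i colonne) j mot.toList.length =
        pvCellsN (fun k : Nat => pvCellD board i (j + (k : Int))) 0 mot.toList.length := by
      rw [pvCells_eq_map, pvCellsN_eq_map]
      simp
    have hlen : mot.toList.length = mot.length := by simp
    rw [hlen] at hA hB hc
    simp [comptage, comptage_alt, pvRun, hA, hB, hc]
  · by_cases hd2 : direction = "verticale"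
    · subst hd2
      have hA := pvLoop (fun ligne => pvCellD board ligne j) mot.toList i 0 0 []
      have hB := pvGo_eq (fun k : Nat => pvCellD board (i + (k : Int)) j) mot.toList.length 0
      have hc : pvCells (fun ligne => pvCellD board ligne j) i mot.toList.length =
          pvCellsN (fun k : Nat => pvCellD board (i + (k : Int)) j) 0 mot.toList.length := by
        rw [pvCells_eq_map, pvCellsN_eq_map]
        simp
      have hlen : mot.toList.length = mot.length := by simp
      rw [hlen] at hA hB hc
      simp [comptage, comptage_alt, pvRun, hA, hB, hc]
    · simp [comptage, comptage_alt, hd1, hd2]
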